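-- pv_equiv track=rewrite | github.com/seahrh/coding-interview | src/codi/datastructures/shortest_supersequence.py | _location_map
-- ===== SOURCE A (Python) =====
-- from collections import deque
-- from typing import Deque, Dict, List, NamedTuple, Optional, Set
--
-- def _location_map(arr: List[int], includes: Set[int]) -> Dict[int, Deque[int]]:
--     res: Dict[int, Deque[int]] = {}  # O(B) space
--     # initialize empty linked list, in case include not found in array
--     for i in includes:  # O(S) time
--         res[i] = deque()
--     for i, a in enumerate(arr):  # O(B) time
--         if a in includes:
--             res[a].append(i)
--     return res
-- ===== SOURCE B (Python) =====
-- from collections import deque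
-- from typing import Deque, Dict, List, Set
--
--
-- def _location_map(arr: List[int], includes: Set[int]) -> Dict[int, Deque[int]]:
--     # Group-by-value: for each included value, scan arr once for its indices.
--     return {v: deque(i for i, a in enumerate(arr) if a == v) for v in includes}
-- ===== Notes on version B (the rewrite author's own statement) =====
-- stated objective: alternative
-- what changed: Inverts the loop nesting: instead of initializing empty deques and one index-append pass over arr with set-membership tests, B builds the map as a dict comprehension that, for each included value, scans arr and gathers that value's indices (group-by-value).
import Mathlib
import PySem

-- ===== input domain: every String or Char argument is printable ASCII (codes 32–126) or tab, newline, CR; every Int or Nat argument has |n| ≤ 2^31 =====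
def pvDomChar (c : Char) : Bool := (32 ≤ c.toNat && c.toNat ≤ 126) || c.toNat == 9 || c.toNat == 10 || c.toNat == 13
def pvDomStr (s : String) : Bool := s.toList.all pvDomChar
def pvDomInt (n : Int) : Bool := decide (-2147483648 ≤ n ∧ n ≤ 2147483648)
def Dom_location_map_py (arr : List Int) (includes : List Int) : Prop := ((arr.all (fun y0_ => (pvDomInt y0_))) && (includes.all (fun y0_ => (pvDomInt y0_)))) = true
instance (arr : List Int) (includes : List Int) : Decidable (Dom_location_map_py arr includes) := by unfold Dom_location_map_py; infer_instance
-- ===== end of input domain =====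

-- B replaces A's init-then-append single pass over arr by a per-value group-by scan (alternative decomposition, not faster).


-- ===== PORT A =====
-- res = {}; for i in includes: res[i] = deque(); for i, a in enumerate(arr): if a in includes: res[a].append(i)
def location_map_py (arr : List Int) (includes : List Int) : List (Int × List Int) :=
  let res : PySem.Dict Int (List Int) :=
    includes.foldl (fun d i => d.insert i ([] : List Int)) PySem.Dict.empty
  let res :=
    (PySem.List.enumerate arr 0).foldl
      (fun d p => if PySem.Set.contains includes p.2 then d.modify p.2 [] (· ++ [p.1]) else d) res
  res.items

-- ===== PORT B =====
-- {v: deque(i for i, a in enumerate(arr) if a == v) for v in includes}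
def location_map_py_alt (arr : List Int) (includes : List Int) : List (Int × List Int) :=
  (includes.foldl
      (fun d v =>
        d.insert v (((PySem.List.enumerate arr 0).filter (fun p => p.2 == v)).map (·.1)))
      PySem.Dict.empty).items

-- ===== PRECONDITION & SPEC =====
def Spec_location_map_py (arr : List Int) (includes : List Int) (out : List (Int × List Int)) : Prop := out = location_map_py_alt arr includes
instance (arr : List Int) (includes : List Int) (out : List (Int × List Int)) : Decidable (Spec_location_map_py arr includes out) := by unfold Spec_location_map_py; infer_instance

-- ===== CLAIM (what is proved, stated in full; the proofs are below) =====
def Claim_equal_location_map_py : Prop := ∀ (arr : List Int) (includes : List Int), Dom_location_map_py arr includes → Spec_location_map_py arr includes (location_map_py arr includes)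

-- ===== LEMMAS AND PROOFS =====

-- dropping the 'if cond then f d p else d' guard = folding over the filtered list
theorem foldl_if_eq_foldl_filter {α β : Type} (f : β → α → β) (c : α → Bool) :
    ∀ (l : List α) (d : β),
      l.foldl (fun d p => if c p then f d p else d) d = (l.filter c).foldl f d := by
  intro l
  induction l with
  | nil => intro d; rfl
  | cons x xs ih =>
    intro d
    by_cases h : c x = true
    · simp [h, ih]
    · simp [h, ih]

-- value at k after inserting a key-determined value for every element of l
theorem getD_foldl_insert_keyval {ν : Type} (g : Int → ν) (dflt : ν) :
    ∀ (l : List Int) (d : PySem.Dict Int ν) (k : Int),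
      (l.foldl (fun d v => d.insert v (g v)) d).getD k dflt
        = if k ∈ l then g k else d.getD k dflt := by
  intro l
  induction l with
  | nil => intro d k; simp
  | cons x xs ih =>
    intro d k
    simp only [List.foldl_cons, ih, PySem.Dict.getD_insert, List.mem_cons]
    by_cases hx : k ∈ xs
    · simp [hx]
    · by_cases he : k = x <;> simp [hx, he]

-- a constant-[] insert loop leaves every lookup at []
theorem getD_foldl_insert_nil {ν : Type} :
    ∀ (l : List Int) (d : PySem.Dict Int (List ν)) (k : Int), d.getD k [] = [] →
      (l.foldl (fun d i => d.insert i ([] : List ν)) d).getD k [] = [] := by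
  intro l
  induction l with
  | nil => intro d k h; simpa using h
  | cons x xs ih =>
    intro d k h
    simp only [List.foldl_cons]
    apply ih
    rw [PySem.Dict.getD_insert]
    split <;> simp [h]

theorem set_update_of_subset (s : PySem.Set Int) :
    ∀ (l : List Int), (∀ x ∈ l, PySem.Set.contains s x = true) → PySem.Set.update s l = s := by
  intro l
  induction l generalizing s with
  | nil => intro _; rfl
  | cons x xs ih =>
    intro h
    have hx := h x (by simp)
    simp only [PySem.Set.update, List.foldl_cons, PySem.Set.add, hx, if_pos]
    exact ih s (fun y hy => h y (by simp [hy]))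

theorem location_map_py_spec' : ∀ (arr includes : List Int),
    location_map_py arr includes = location_map_py_alt arr includes := by
  intro arr includes
  unfold location_map_py location_map_py_alt
  set L := PySem.List.enumerate arr 0 with hL
  set idx : Int → List Int := fun v => ((L.filter (fun p => p.2 == v)).map (·.1)) with hidx
  set d0 : PySem.Dict Int (List Int) :=
    includes.foldl (fun d i => d.insert i ([] : List Int)) PySem.Dict.empty with hd0
  -- A's second loop = a modify-fold over the filtered, swapped pairs
  have hA1 : L.foldl
      (fun d p => if PySem.Set.contains includes p.2 then d.modify p.2 [] (· ++ [p.1]) else d) d0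
      = ((L.filter (fun p => PySem.Set.contains includes p.2)).map Prod.swap).foldl
          (fun d p => d.modify p.1 [] (· ++ [p.2])) d0 := by
    rw [foldl_if_eq_foldl_filter (fun d p => d.modify p.2 [] (· ++ [p.1]))
        (fun p => PySem.Set.contains includes p.2) L d0, List.foldl_map]
    simp [Prod.swap]
  set DA := ((L.filter (fun p => PySem.Set.contains includes p.2)).map Prod.swap).foldl
      (fun d p => d.modify p.1 [] (· ++ [p.2])) d0 with hDA
  set DB := includes.foldl (fun d v => d.insert v (idx v)) PySem.Dict.empty with hDB
  show (L.foldl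
      (fun d p => if PySem.Set.contains includes p.2 then d.modify p.2 [] (· ++ [p.1]) else d)
      d0).items = DB.items
  rw [hA1]
  -- keys of d0 and of both final dicts
  have hkd0 : d0.keys = PySem.Set.ofList includes := by
    rw [hd0, PySem.Dict.keys_foldl_insert]
    simp [PySem.Set.ofList_eq_foldl, PySem.Set.update]
  have hnd0 : d0.keys.Nodup := by rw [hkd0]; exact PySem.Set.nodup_ofList includes
  have hkA : DA.keys = PySem.Set.ofList includes := by
    rw [hDA, PySem.Dict.keys_foldl_modify_key, hkd0]
    apply set_update_of_subset
    intro x hx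
    simp only [List.map_map, List.mem_map, List.mem_filter, Function.comp, Prod.swap] at hx
    obtain ⟨p, ⟨_, hc⟩, hpx⟩ := hx
    subst hpx
    simp only [PySem.Set.contains] at hc ⊢
    have hm : p.2 ∈ includes := by simpa using hc
    have : p.2 ∈ PySem.Set.ofList includes := (PySem.Set.mem_ofList includes p.2).mpr hm
    simpa using this
  have hkB : DB.keys = PySem.Set.ofList includes := by
    rw [hDB, PySem.Dict.keys_foldl_insert]
    simp [PySem.Set.ofList_eq_foldl, PySem.Set.update]
  have hnA : DA.keys.Nodup := by rw [hkA]; exact PySem.Set.nodup_ofList includes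
  have hnB : DB.keys.Nodup := by rw [hkB]; exact PySem.Set.nodup_ofList includes
  -- items via keys + lookups
  rw [PySem.Dict.items_eq_map_keys DA hnA [], PySem.Dict.items_eq_map_keys DB hnB [], hkA, hkB]
  apply List.map_congr_left
  intro k hk
  have hkinc : k ∈ includes := (PySem.Set.mem_ofList includes k).mp hk
  have hgB : DB.getD k [] = idx k := by
    rw [hDB, getD_foldl_insert_keyval idx [] includes PySem.Dict.empty k, if_pos hkinc]
  have hg0 : d0.getD k [] = [] := by
    rw [hd0]; exact getD_foldl_insert_nil includes PySem.Dict.empty k (by simp)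
  have hgA : DA.getD k [] = idx k := by
    rw [hDA, PySem.Dict.getD_foldl_modify_append, hg0, List.nil_append, hidx]
    rw [List.filter_map, List.filter_filter, List.map_map]
    have hfe : ∀ p ∈ L,
        (((fun (q : Int × Int) => q.1 == k) ∘ Prod.swap) p && PySem.Set.contains includes p.2)
          = (p.2 == k) := by
      intro p _
      by_cases h : p.2 = k
      · simp [Function.comp, Prod.swap, h, PySem.Set.contains, hkinc]
      · simp [Function.comp, Prod.swap, h]
    rw [List.filter_congr hfe]
    apply List.map_congr_left
    intro p _
    rfl
  rw [hgA, hgB]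

-- ===== VERDICT (by name: the statement is the Claim_ definition above) =====
theorem location_map_py_spec : Claim_equal_location_map_py := by
  intro arr includes _
  unfold Spec_location_map_py
  exact location_map_py_spec' arr includes
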